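-- pv_equiv track=rewrite | github.com/SolbiatiAlessandro/pyComPro | codeforces/contest/1132/F_upsolving.py | solve
-- ===== SOURCE A (Python) =====
-- def solve(s):
--     n = len(s)
--     memo = [[-1 for _ in range(n)] for _ in range(n)]
--     def dp(l, r):
--         if l > r: return 0
--         if memo[l][r] != -1: return memo[l][r]
--         res = min([1 + dp(l + 1, r)] +                    \
--                 [dp(l + 1, i - 1) + dp(i, r) for          \
--                 i in range(l + 1, r + 1) if s[i] == s[l]])
--         memo[l][r] = res
--         return res
--     return dp(0, n - 1)
-- ===== SOURCE B (Python) =====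
-- def solve(s):
--     n = len(s)
--     if n == 0:
--         return 0
--     dp = [[0] * n for _ in range(n)]
--     for l in range(n - 1, -1, -1):
--         dp[l][l] = 1
--         for r in range(l + 1, n):
--             best = 1 + dp[l + 1][r]
--             for i in range(l + 1, r + 1):
--                 if s[i] == s[l]:
--                     left = dp[l + 1][i - 1] if l + 1 <= i - 1 else 0
--                     best = min(best, left + dp[i][r])
--             dp[l][r] = best
--     return dp[0][n - 1]
-- ===== Notes on version B (the rewrite author's own statement) =====
-- stated objective: faster
-- what changed: Replaces A's memoized top-down recursion (n*n memo, min over a freshly built candidate list per call) by an iterative bottom-up 2D interval-DP table filled row by row with a running minimum.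
import Mathlib
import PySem

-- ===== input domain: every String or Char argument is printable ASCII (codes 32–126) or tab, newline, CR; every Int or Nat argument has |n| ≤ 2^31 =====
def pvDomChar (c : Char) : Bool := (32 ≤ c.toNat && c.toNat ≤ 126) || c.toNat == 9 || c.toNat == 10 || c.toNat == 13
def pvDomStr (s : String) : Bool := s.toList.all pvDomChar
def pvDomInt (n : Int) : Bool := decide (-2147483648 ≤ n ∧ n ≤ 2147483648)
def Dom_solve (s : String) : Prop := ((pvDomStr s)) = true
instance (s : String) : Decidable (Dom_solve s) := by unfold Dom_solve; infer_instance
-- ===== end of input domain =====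

-- B replaces A's memoized top-down recursion by a bottom-up 2D interval table filled row by row; same O(n^3) asymptotics, measurably faster by a constant factor (no recursion/memo-dispatch overhead).

-- ===== PORT A =====
-- A's inner dp(l, r); the Python memo table is a pure cache (it only stores values
-- this same recursion already computed), so the port is the identical recursion
-- without the cache — every returned value is unchanged.  The Nat fuel is only a
-- structural totality guard (each call shrinks the interval, so any fuel larger
-- than the interval size gives the Python recursion's value; solve passes n + 1).
def dpA (cs : List Char) (fuel : Nat) (l r : Int) : Int :=
  match fuel with
  | 0 => 0
  | f + 1 =>
    if l > r then 0
    else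
      ((PySem.List.min?
          ((1 + dpA cs f (l + 1) r) ::
            (((PySem.List.pyRange (l + 1) (r + 1) 1).filter
                (fun i => PySem.List.pyGetD cs i ' ' == PySem.List.pyGetD cs l ' ')).map
              (fun i => dpA cs f (l + 1) (i - 1) + dpA cs f i r)))
          (fun x => x)).getD 0)

def solve (s : String) : Int := dpA s.toList (s.toList.length + 1) 0 (PySem.Str.len s - 1)

-- ===== PORT B =====
-- dp[l][r]
def gB (t : List (List Int)) (l r : Int) : Int :=
  PySem.List.pyGetD (PySem.List.pyGetD t l []) r 0

-- dp[l][r] = v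
def setB (t : List (List Int)) (l r : Int) (v : Int) : List (List Int) :=
  PySem.List.pySetD t l (PySem.List.pySetD (PySem.List.pyGetD t l []) r v)

-- the inner 'for i' loop computing best for interval (l, r)
def innerB (cs : List Char) (t : List (List Int)) (l r : Int) : Int :=
  (PySem.List.pyRange (l + 1) (r + 1) 1).foldl
    (fun best i =>
      if PySem.List.pyGetD cs i ' ' == PySem.List.pyGetD cs l ' ' then
        min best ((if l + 1 ≤ i - 1 then gB t (l + 1) (i - 1) else 0) + gB t i r)
      else best)
    (1 + gB t (l + 1) r)

-- the 'for r' loop filling row l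
def rowB (cs : List Char) (n : Int) (t : List (List Int)) (l : Int) : List (List Int) :=
  (PySem.List.pyRange (l + 1) n 1).foldl
    (fun t r => setB t l r (innerB cs t l r))
    (setB t l l 1)

def solve_alt (s : String) : Int :=
  let cs := s.toList
  let n : Int := PySem.Str.len s
  if n == 0 then 0
  else
    let t0 := List.replicate cs.length (List.replicate cs.length (0 : Int))
    let t := (PySem.List.pyRange (n - 1) (-1) (-1)).foldl (rowB cs n) t0
    gB t 0 (n - 1)

-- ===== PRECONDITION & SPEC =====
def Spec_solve (s : String) (out : Int) : Prop := out = solve_alt s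
instance (s : String) (out : Int) : Decidable (Spec_solve s out) := by unfold Spec_solve; infer_instance

-- ===== CLAIM (what is proved, stated in full; the proofs are below) =====
def Claim_equal_solve : Prop := ∀ (s : String), Dom_solve s → Spec_solve s (solve s)

-- ===== LEMMAS AND PROOFS =====

theorem dpA_fuel (k : Nat) :
    ∀ (cs : List Char) (l r : Int) (f1 f2 : Nat), (r + 1 - l).toNat = k → k < f1 → k < f2 →
      dpA cs f1 l r = dpA cs f2 l r := by
  induction k using Nat.strong_induction_on with
  | _ k ih =>
    intro cs l r f1 f2 hk h1 h2
    obtain ⟨a, rfl⟩ : ∃ a, f1 = a + 1 := ⟨f1 - 1, by omega⟩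
    obtain ⟨b, rfl⟩ : ∃ b, f2 = b + 1 := ⟨f2 - 1, by omega⟩
    by_cases hlr : l > r
    · simp [dpA, hlr]
    · simp only [dpA, if_neg hlr]
      have hhead : dpA cs a (l + 1) r = dpA cs b (l + 1) r :=
        ih (r - l).toNat (by omega) cs (l + 1) r a b (by omega) (by omega) (by omega)
      have htail : ∀ i ∈ (PySem.List.pyRange (l + 1) (r + 1) 1).filter
          (fun i => PySem.List.pyGetD cs i ' ' == PySem.List.pyGetD cs l ' '),
          dpA cs a (l + 1) (i - 1) + dpA cs a i r = dpA cs b (l + 1) (i - 1) + dpA cs b i r := by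
        intro i hi
        have hm := PySem.List.mem_pyRange_one.mp (List.mem_of_mem_filter hi)
        rw [ih (i - 1 + 1 - (l + 1)).toNat (by omega) cs (l + 1) (i - 1) a b rfl (by omega)
            (by omega),
          ih (r + 1 - i).toNat (by omega) cs i r a b rfl (by omega) (by omega)]
      rw [hhead, List.map_congr_left htail]

-- dpAc cs l r: the value A's dp(l, r) returns (dpA with any sufficient fuel)
def dpAc (cs : List Char) (l r : Int) : Int := dpA cs ((r + 1 - l).toNat + 1) l r

theorem dpA_eq_dpAc (cs : List Char) (l r : Int) (f : Nat) (h : (r + 1 - l).toNat < f) :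
    dpA cs f l r = dpAc cs l r :=
  dpA_fuel (r + 1 - l).toNat cs l r f ((r + 1 - l).toNat + 1) rfl h (by omega)

theorem dpAc_base (cs : List Char) (l r : Int) (h : r < l) : dpAc cs l r = 0 := by
  simp [dpAc, dpA, show l > r from h]

theorem dpAc_eq (cs : List Char) (l r : Int) (h : l ≤ r) :
    dpAc cs l r =
      (((PySem.List.pyRange (l + 1) (r + 1) 1).filter
            (fun i => PySem.List.pyGetD cs i ' ' == PySem.List.pyGetD cs l ' ')).map
          (fun i => dpAc cs (l + 1) (i - 1) + dpAc cs i r)).foldl min (1 + dpAc cs (l + 1) r) := by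
  show dpA cs ((r + 1 - l).toNat + 1) l r = _
  simp only [dpA, if_neg (by omega : ¬ l > r)]
  rw [dpA_eq_dpAc cs (l + 1) r _ (by omega)]
  have htail : ∀ i ∈ (PySem.List.pyRange (l + 1) (r + 1) 1).filter
      (fun i => PySem.List.pyGetD cs i ' ' == PySem.List.pyGetD cs l ' '),
      dpA cs (r + 1 - l).toNat (l + 1) (i - 1) + dpA cs (r + 1 - l).toNat i r =
        dpAc cs (l + 1) (i - 1) + dpAc cs i r := by
    intro i hi
    have hm := PySem.List.mem_pyRange_one.mp (List.mem_of_mem_filter hi)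
    rw [dpA_eq_dpAc cs (l + 1) (i - 1) _ (by omega), dpA_eq_dpAc cs i r _ (by omega)]
  rw [List.map_congr_left htail, PySem.List.min?_id_cons]
  simp

theorem dpAc_diag (cs : List Char) (l : Int) : dpAc cs l l = 1 := by
  rw [dpAc_eq cs l l le_rfl]
  rw [PySem.List.pyRange_one_eq_nil (by omega)]
  simp [dpAc_base cs (l + 1) l (by omega)]

theorem innerB_eq (cs : List Char) (t : List (List Int)) (l r : Int)
    (hlr : l + 1 ≤ r) (hr : r < (cs.length : Int))
    (hread : ∀ i r' : Int, l + 1 ≤ i → i ≤ r' → r' < (cs.length : Int) → gB t i r' = dpAc cs i r') :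
    innerB cs t l r = dpAc cs l r := by
  unfold innerB
  rw [PySem.List.foldl_congr_mem
    (g := fun best i =>
      if PySem.List.pyGetD cs i ' ' == PySem.List.pyGetD cs l ' ' then
        min best (dpAc cs (l + 1) (i - 1) + dpAc cs i r)
      else best)]
  · rw [PySem.List.foldl_if_eq_foldl_filter]
    rw [hread (l + 1) r le_rfl hlr hr]
    rw [dpAc_eq cs l r (by omega)]
    rw [List.foldl_map]
  · intro acc i hi
    have hm := PySem.List.mem_pyRange_one.mp hi
    congr 1
    by_cases hg : l + 1 ≤ i - 1
    · rw [if_pos hg, hread (l + 1) (i - 1) le_rfl hg (by omega),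
        hread i r (by omega) (by omega) hr]
    · rw [if_neg hg, hread i r (by omega) (by omega) hr,
        dpAc_base cs (l + 1) (i - 1) (by omega)]

def InvT (cs : List Char) (t : List (List Int)) (l0 : Int) : Prop :=
  t.length = cs.length ∧
  (∀ j : Int, 0 ≤ j → j < (cs.length : Int) → (PySem.List.pyGetD t j []).length = cs.length) ∧
  (∀ l r : Int, l0 ≤ l → l ≤ r → r < (cs.length : Int) → gB t l r = dpAc cs l r)

theorem pyGetD_set_row {α : Type} [Inhabited α] (t : List α) (l j : Int) (v d : α)
    (hl0 : 0 ≤ l) (_hl : l < (t.length : Int)) (hj0 : 0 ≤ j) (hj : j < (t.length : Int)) :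
    PySem.List.pyGetD (PySem.List.pySetD t l v) j d =
      if j = l then v else PySem.List.pyGetD t j d := by
  rw [PySem.List.pySetD_of_nonneg _ _ hl0]
  rw [PySem.List.pyGetD_eq_getElem _ d hj0 (by simpa using hj)]
  rw [List.getElem_set]
  by_cases h : j = l
  · rw [if_pos (by omega), if_pos h]
  · rw [if_neg (by omega), if_neg h, PySem.List.pyGetD_eq_getElem _ d hj0 hj]

theorem setB_len (t : List (List Int)) (l r : Int) (v : Int) :
    (setB t l r v).length = t.length := by
  simp [setB, PySem.List.length_pySetD]

theorem rowfold_inv (cs : List Char) (t : List (List Int)) (l : Int)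
    (hInv : InvT cs t (l + 1)) (hl : 0 ≤ l) (hln : l < (cs.length : Int)) (r0 : Int)
    (h1 : l + 1 ≤ r0) :
    r0 ≤ (cs.length : Int) →
    ((PySem.List.pyRange (l + 1) r0 1).foldl
        (fun t r => setB t l r (innerB cs t l r)) (setB t l l 1)).length = cs.length ∧
    (∀ j : Int, 0 ≤ j → j < (cs.length : Int) → j ≠ l →
      PySem.List.pyGetD ((PySem.List.pyRange (l + 1) r0 1).foldl
        (fun t r => setB t l r (innerB cs t l r)) (setB t l l 1)) j [] =
        PySem.List.pyGetD t j []) ∧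
    (∀ j : Int, 0 ≤ j → j < (cs.length : Int) →
      (PySem.List.pyGetD ((PySem.List.pyRange (l + 1) r0 1).foldl
        (fun t r => setB t l r (innerB cs t l r)) (setB t l l 1)) j []).length = cs.length) ∧
    (∀ r : Int, l ≤ r → r < r0 →
      gB ((PySem.List.pyRange (l + 1) r0 1).foldl
        (fun t r => setB t l r (innerB cs t l r)) (setB t l l 1)) l r = dpAc cs l r) := by
  obtain ⟨hlen, hrowlen, hval⟩ := hInv
  induction r0, h1 using Int.le_induction with
  | base =>
    intro _
    rw [PySem.List.pyRange_one_eq_nil (by omega)]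
    simp only [List.foldl_nil]
    refine ⟨by rw [setB_len, hlen], ?_, ?_, ?_⟩
    · intro j hj0 hj hjl
      rw [setB, pyGetD_set_row t l j _ [] hl (by omega) hj0 (by omega), if_neg hjl]
    · intro j hj0 hj
      rw [setB, pyGetD_set_row t l j _ [] hl (by omega) hj0 (by omega)]
      by_cases h : j = l
      · rw [if_pos h, PySem.List.length_pySetD]
        exact hrowlen l hl hln
      · rw [if_neg h]
        exact hrowlen j hj0 hj
    · intro r hr1 hr2
      have hrl : r = l := by omega
      subst hrl
      rw [gB, setB, pyGetD_set_row t r r _ [] hl (by omega) hl (by omega), if_pos rfl]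
      rw [pyGetD_set_row _ r r 1 0 hl (by rw [hrowlen r hl hln]; omega) hl
        (by rw [hrowlen r hl hln]; omega), if_pos rfl]
      exact (dpAc_diag cs r).symm
  | succ r0 hr0 ih =>
    intro hr0n
    obtain ⟨ih1, ih2, ih3, ih4⟩ := ih (by omega)
    rw [PySem.List.pyRange_one_succ_right (by omega), List.foldl_append]
    simp only [List.foldl_cons, List.foldl_nil]
    set t2 := (PySem.List.pyRange (l + 1) r0 1).foldl
        (fun t r => setB t l r (innerB cs t l r)) (setB t l l 1) with ht2
    have hread : ∀ i r' : Int, l + 1 ≤ i → i ≤ r' → r' < (cs.length : Int) →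
        gB t2 i r' = dpAc cs i r' := by
      intro i r' hi hir hr'
      rw [gB, ih2 i (by omega) (by omega) (by omega)]
      exact hval i r' hi hir hr'
    have hinner : innerB cs t2 l r0 = dpAc cs l r0 :=
      innerB_eq cs t2 l r0 hr0 (by omega) hread
    have hl2 : l < (t2.length : Int) := by rw [ih1]; exact hln
    refine ⟨by rw [setB_len, ih1], ?_, ?_, ?_⟩
    · intro j hj0 hj hjl
      rw [setB, pyGetD_set_row t2 l j _ [] hl hl2 hj0 (by omega), if_neg hjl]
      exact ih2 j hj0 hj hjl
    · intro j hj0 hj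
      rw [setB, pyGetD_set_row t2 l j _ [] hl hl2 hj0 (by omega)]
      by_cases h : j = l
      · rw [if_pos h, PySem.List.length_pySetD]
        exact ih3 l hl hln
      · rw [if_neg h]
        exact ih3 j hj0 hj
    · intro r hr1 hr2
      have hrowl : ((PySem.List.pyGetD t2 l []).length : Int) = (cs.length : Int) := by
        exact_mod_cast congrArg Nat.cast (ih3 l hl hln)
      rw [gB, setB, pyGetD_set_row t2 l l _ [] hl hl2 hl (by omega), if_pos rfl]
      rw [pyGetD_set_row _ r0 r _ 0 (by omega) (by rw [hrowl]; omega) (by omega)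
        (by rw [hrowl]; omega)]
      by_cases h : r = r0
      · rw [if_pos h, hinner, h]
      · rw [if_neg h]
        exact ih4 r hr1 (by omega)

theorem rowB_inv (cs : List Char) (t : List (List Int)) (l : Int)
    (hInv : InvT cs t (l + 1)) (hl : 0 ≤ l) (hln : l < (cs.length : Int)) :
    InvT cs (rowB cs (cs.length : Int) t l) l := by
  obtain ⟨h1, h2, h3, h4⟩ :=
    rowfold_inv cs t l hInv hl hln (cs.length : Int) (by omega) le_rfl
  unfold rowB
  refine ⟨h1, h3, ?_⟩
  intro l' r hl' hlr hr
  by_cases h : l' = l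
  · subst h
    exact h4 r hlr hr
  · rw [gB, h2 l' (by omega) (by omega) h]
    exact hInv.2.2 l' r (by omega) hlr hr

theorem outer_inv (cs : List Char) (k : Nat) (l0 : Int) (hk : (l0 + 1).toNat = k)
    (h1 : -1 ≤ l0) (h2 : l0 ≤ (cs.length : Int) - 1) :
    ∀ t, InvT cs t (l0 + 1) →
      InvT cs ((PySem.List.pyRange l0 (-1) (-1)).foldl (rowB cs (cs.length : Int)) t) 0 := by
  induction k generalizing l0 with
  | zero =>
    intro t hInv
    have hl0 : l0 = -1 := by omega
    subst hl0
    rw [PySem.List.pyRange_neg_one_eq_nil (by omega)]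
    simpa using hInv
  | succ k ih =>
    intro t hInv
    have hl0 : 0 ≤ l0 := by omega
    rw [PySem.List.pyRange_neg_one_cons (by omega)]
    simp only [List.foldl_cons]
    have hrow := rowB_inv cs t l0 hInv hl0 (by omega)
    have heq : l0 - 1 + 1 = l0 := by omega
    have := ih (l0 - 1) (by omega) (by omega) (by omega)
      (rowB cs (cs.length : Int) t l0) (by rw [heq]; exact hrow)
    exact this

theorem invT_init (cs : List Char) :
    InvT cs (List.replicate cs.length (List.replicate cs.length (0 : Int)))
      (cs.length : Int) := by
  refine ⟨by simp, ?_, ?_⟩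
  · intro j hj0 hj
    rw [PySem.List.pyGetD_eq_getElem _ [] hj0 (by simpa using hj)]
    simp
  · intro l r hl hlr hr
    exact absurd hr (by omega)

-- ===== VERDICT (by name: the statement is the Claim_ definition above) =====
theorem solve_spec : Claim_equal_solve := by
  intro s _
  unfold Spec_solve solve solve_alt
  simp only [PySem.Str.len_eq]
  by_cases h : s.toList.length = 0
  · rw [if_pos (by simp [h])]
    rw [dpA_eq_dpAc s.toList 0 ((s.toList.length : Int) - 1) _ (by omega)]
    exact dpAc_base s.toList 0 ((s.toList.length : Int) - 1) (by omega)
  · rw [if_neg (by simpa using h)]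
    have hInv := outer_inv s.toList (s.toList.length) ((s.toList.length : Int) - 1)
      (by omega) (by omega) (by omega)
      (List.replicate s.toList.length (List.replicate s.toList.length (0 : Int)))
      (by
        have := invT_init s.toList
        have heq : (s.toList.length : Int) - 1 + 1 = (s.toList.length : Int) := by omega
        rw [heq]
        exact this)
    rw [dpA_eq_dpAc s.toList 0 ((s.toList.length : Int) - 1) _ (by omega)]
    exact (hInv.2.2 0 ((s.toList.length : Int) - 1) le_rfl (by omega) (by omega)).symm
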